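-- pv_equiv track=rewrite | github.com/doozr/euler.py | euler/iter.py | window_greedy
-- ===== SOURCE A (Python) =====
-- from collections import deque
--
-- def take(n, seq):
--     """
--     Get the first n values in a sequence
--
--         take([1, 2, 3, 4], 2)
--         >> 1, 2
--
--     :param n: The number of values to pull
--     :param seq: The sequence to pull values from
--     :return: A generator yielding the first n values of seq
--     """
--     if n < 0:
--         raise ValueError("Only take positive integers")
--     i = iter(seq)
--     return (next(i) for _ in range(n))
--
-- def window_greedy(seq, n):
--     """
--     Get a sliding window of values over a sequence of widths 1 to n
--
--     Each window will have up to n values starting with the first single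
--     value and ending with the last single value. If the length of the
--     sequence is lower than n the entire sequence will be returned as
--     a single window and the width will never be n.
--
--         window_greedy([1, 2, 3, 4, 5], 3)
--         >> [1], [1, 2], [1, 2, 3], [2, 3, 4], [3, 4, 5], [4, 5], [5]
--
--     :param seq: The sequence to iterate over
--     :param n: The maximum width of each window
--     :return: A generator yielding lists of values
--     """
--     if n <= 0:
--         raise ValueError("Window size must be positive integer")
--     it = iter(seq)
--     w = deque(take(1, it), maxlen=n)
--     yield list(w)
--     for x in it:
--         w.append(x)
--         yield list(w)
--     while True:
--         w.popleft()
--         if not len(w):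
--             break
--         yield list(w)
-- ===== SOURCE B (Python) =====
-- def window_greedy(seq, n):
--     """Sliding windows of widths 1..n via index-computed slicing over two ranges."""
--     if n <= 0:
--         raise ValueError("Window size must be positive integer")
--     it = iter(seq)
--     first = next(it)
--     lst = [first]
--     lst.extend(it)
--     L = len(lst)
--     for e in range(1, L + 1):
--         yield lst[max(0, e - n):e]
--     for s in range(max(0, L - n) + 1, L):
--         yield lst[s:L]
-- ===== Notes on version B (the rewrite author's own statement) =====
-- stated objective: simpler
-- what changed: B materializes the sequence once and computes every window directly by max()-based index arithmetic over two range loops (grow then shrink), instead of A's streaming deque with maxlen eviction, per-step list(w) copies and a popleft while-loop.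
import Mathlib
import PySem

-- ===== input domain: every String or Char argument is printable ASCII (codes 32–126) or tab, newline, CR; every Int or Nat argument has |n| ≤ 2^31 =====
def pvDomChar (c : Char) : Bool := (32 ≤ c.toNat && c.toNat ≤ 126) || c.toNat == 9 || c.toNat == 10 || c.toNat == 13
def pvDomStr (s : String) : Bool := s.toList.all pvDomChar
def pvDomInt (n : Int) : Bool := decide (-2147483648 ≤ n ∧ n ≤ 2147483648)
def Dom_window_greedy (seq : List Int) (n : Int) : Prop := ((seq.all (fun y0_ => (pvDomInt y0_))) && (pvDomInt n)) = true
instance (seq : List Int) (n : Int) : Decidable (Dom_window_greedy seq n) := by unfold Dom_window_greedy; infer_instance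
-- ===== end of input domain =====

-- B computes the windows by index arithmetic over two ranges instead of A's streaming deque: simpler.
-- Both are generators; equivalence is about the list of yielded windows.

-- ===== PORT A =====
-- the for-x-in-it loop: deque append with maxlen eviction, yield list(w) each step
def wgGrow (n : Nat) (w : List Int) (rest : List Int) (acc : List (List Int)) :
    List Int × List (List Int) :=
  match rest with
  | [] => (w, acc)
  | x :: t =>
      let w' := if w.length = n then w.tail ++ [x] else w ++ [x]
      wgGrow n w' t (acc ++ [w'])

-- the while-True loop: popleft, break on empty, else yield
def wgShrink (w : List Int) : List (List Int) :=
  match w with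
  | [] => []          -- unreachable under Pre_ (popleft on empty would raise IndexError)
  | _ :: t => if t.isEmpty then [] else t :: wgShrink t

def window_greedy (seq : List Int) (n : Int) : List (List Int) :=
  if n ≤ 0 then []    -- ValueError, excluded by Pre_
  else
    match seq with
    | [] => []        -- deque(take(1, it)) raises RuntimeError on empty seq, excluded by Pre_
    | x :: rest =>
        let p := wgGrow n.toNat [x] rest [[x]]
        p.2 ++ wgShrink p.1

-- ===== PORT B =====
def window_greedy_alt (seq : List Int) (n : Int) : List (List Int) :=
  if n ≤ 0 then []    -- ValueError, excluded by Pre_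
  else
    match seq with
    | [] => []        -- bare next(it) raises (StopIteration→RuntimeError), excluded by Pre_
    | first :: rest =>
        let lst := first :: rest
        let L : Int := (lst.length : Int)
        (PySem.List.pyRange 1 (L + 1) 1).map
            (fun e => PySem.List.slice lst (some (max 0 (e - n))) (some e))
          ++ (PySem.List.pyRange (max 0 (L - n) + 1) L 1).map
            (fun s => PySem.List.slice lst (some s) (some L))

-- ===== PRECONDITION & SPEC =====
-- Pre_ excludes exactly the inputs where A raises: n <= 0 (ValueError) and empty seq (RuntimeError).
def Pre_window_greedy (seq : List Int) (n : Int) : Prop := 0 < n ∧ seq ≠ []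
instance (seq : List Int) (n : Int) : Decidable (Pre_window_greedy seq n) := by
  unfold Pre_window_greedy; infer_instance

def pvWitness_window_greedy : List Int × Int := ([1, 2, 3], 2)

def Spec_window_greedy (seq : List Int) (n : Int) (out : List (List Int)) : Prop :=
  out = window_greedy_alt seq n
instance (seq : List Int) (n : Int) (out : List (List Int)) : Decidable (Spec_window_greedy seq n out) := by
  unfold Spec_window_greedy; infer_instance

-- ===== CLAIM (what is proved, stated in full; the proofs are below) =====
def Claim_equal_window_greedy : Prop := ∀ (seq : List Int) (n : Int),
  Dom_window_greedy seq n → Pre_window_greedy seq n →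
  Spec_window_greedy seq n (window_greedy seq n)

-- ===== LEMMAS AND PROOFS =====

-- the window after e elements have been consumed (1 ≤ e ≤ length): last min(e,N) of the first e
def win (lst : List Int) (N e : Nat) : List Int :=
  (lst.drop (e - N)).take (e - (e - N))

theorem win_length (lst : List Int) (N e : Nat) (he : e ≤ lst.length) :
    (win lst N e).length = min e N := by
  simp [win]; omega

theorem win_step (lst : List Int) (N e : Nat) (hN : 1 ≤ N)
    (he : e < lst.length) :
    (if (win lst N e).length = N then (win lst N e).tail ++ [lst[e]]
     else win lst N e ++ [lst[e]]) = win lst N (e + 1) := by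
  rw [win_length lst N e (le_of_lt he)]
  by_cases hle : N ≤ e
  · have hmin : min e N = N := by omega
    rw [if_pos hmin]
    obtain ⟨M, rfl⟩ : ∃ M, N = M + 1 := ⟨N - 1, by omega⟩
    simp only [win, ← List.drop_one, List.drop_take, List.drop_drop]
    have h1 : e - (e - (M + 1)) - 1 = M := by omega
    have h2 : e + 1 - (e + 1 - (M + 1)) = M + 1 := by omega
    have h3 : e + 1 - (M + 1) = 1 + (e - (M + 1)) := by omega
    rw [h1, h2, h3, List.take_add_one]
    have hi : 1 + (e - (M + 1)) + M = e := by omega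
    have h5 : (lst.drop (1 + (e - (M + 1))))[M]? = some lst[e] := by
      rw [List.getElem?_drop, hi, List.getElem?_eq_getElem he]
    rw [h5]
    have h6 : e - (M + 1) + 1 = 1 + (e - (M + 1)) := by omega
    simp [h6]
  · have hmin : min e N ≠ N := by omega
    rw [if_neg hmin]
    have h1 : e - N = 0 := by omega
    have h2 : e + 1 - N = 0 := by omega
    simp only [win, h1, h2, Nat.sub_zero, List.drop_zero]
    rw [List.take_add_one, List.getElem?_eq_getElem he]
    simp

theorem wgGrow_eq (lst : List Int) (N : Nat) (hN : 1 ≤ N) :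
    ∀ (m e : Nat) (acc : List (List Int)), 1 ≤ e → e + m = lst.length →
    wgGrow N (win lst N e) (lst.drop e) acc =
      (win lst N lst.length,
       acc ++ (List.range m).map (fun k => win lst N (e + 1 + k))) := by
  intro m
  induction m with
  | zero =>
    intro e acc he1 hem
    have hd : lst.drop e = [] := by
      rw [List.drop_eq_nil_iff]; omega
    rw [hd]
    simp [wgGrow, ← hem]
  | succ m ih =>
    intro e acc he1 hem
    have hlt : e < lst.length := by omega
    have hd : lst.drop e = lst[e] :: lst.drop (e + 1) :=
      List.drop_eq_getElem_cons hlt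
    rw [hd]
    simp only [wgGrow]
    rw [win_step lst N e hN hlt]
    rw [ih (e + 1) (acc ++ [win lst N (e + 1)]) (by omega) (by omega)]
    congr 1
    rw [List.range_succ_eq_map]
    simp only [List.map_cons, List.map_map, List.append_assoc, List.cons_append,
      List.nil_append, Nat.add_zero]
    congr 2
    apply List.map_congr_left
    intro k _
    simp only [Function.comp]
    congr 1
    omega

theorem wgShrink_eq : ∀ (w : List Int),
    wgShrink w = (List.range (w.length - 1)).map (fun k => w.drop (k + 1)) := by
  intro w
  induction w with
  | nil => simp [wgShrink]
  | cons x t ih =>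
    cases t with
    | nil => simp [wgShrink]
    | cons y s =>
      conv_lhs => rw [wgShrink]
      simp only [List.isEmpty_cons, if_neg Bool.false_ne_true]
      rw [ih]
      simp only [List.length_cons, Nat.add_sub_cancel]
      rw [List.range_succ_eq_map]
      simp [List.map_map, Function.comp, List.drop_succ_cons]

-- ===== VERDICT (by name: the statement is the Claim_ definition above) =====
theorem window_greedy_spec : Claim_equal_window_greedy := by
  intro seq n _ hpre
  obtain ⟨hn, hne⟩ := hpre
  unfold Spec_window_greedy
  match seq with
  | [] => exact absurd rfl hne
  | x :: rest =>
    simp only [window_greedy, window_greedy_alt, if_neg (not_le.mpr hn)]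
    set lst : List Int := x :: rest with hlst
    set L : Nat := lst.length with hL
    set N : Nat := n.toNat with hNdef
    have hN1 : 1 ≤ N := by omega
    have hnN : n = (N : Int) := by omega
    have hL1 : 1 ≤ L := by simp [hL, hlst]
    -- A side
    have hw1 : win lst N 1 = [x] := by
      have h1 : 1 - N = 0 := by omega
      simp [win, h1, hlst, List.take_add_one]
    have hrest : rest = lst.drop 1 := by simp [hlst]
    have hA := wgGrow_eq lst N hN1 (L - 1) 1 [win lst N 1] (by omega) (by omega)
    rw [← hw1, hrest]
    rw [hA]
    -- grow part of A as one range
    have hgrowA : ([win lst N 1] ++ (List.range (L - 1)).map (fun k => win lst N (1 + 1 + k)))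
        = (List.range L).map (fun k => win lst N (k + 1)) := by
      have hLs : L = (L - 1) + 1 := by omega
      rw [hLs, List.range_succ_eq_map]
      simp only [List.map_cons, List.map_map, Nat.zero_add, List.singleton_append]
      congr 1
      apply List.map_congr_left
      intro k _
      simp only [Function.comp]
      congr 1
      omega
    -- shrink part of A
    have hwL : win lst N L = lst.drop (L - N) := by
      have : (lst.drop (L - N)).length = L - (L - N) := by simp [hL]
      rw [win, ← this, List.take_length]
    have hshrinkA : wgShrink (win lst N L)
        = (List.range (L - (L - N + 1))).map (fun k => lst.drop (L - N + 1 + k)) := by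
      rw [wgShrink_eq, hwL]
      have hlen : (lst.drop (L - N)).length = L - (L - N) := by simp [hL]
      rw [hlen]
      have hcnt : L - (L - N) - 1 = L - (L - N + 1) := by omega
      rw [hcnt]
      apply List.map_congr_left
      intro k _
      rw [List.drop_drop]
      congr 1
      omega
    -- B side: grow range
    have hgrowB : (PySem.List.pyRange 1 ((L : Int) + 1) 1).map
          (fun e => PySem.List.slice lst (some (max 0 (e - n))) (some e))
        = (List.range L).map (fun k => win lst N (k + 1)) := by
      rw [PySem.List.pyRange_one]
      have hcnt : (((L : Int) + 1) - 1).toNat = L := by omega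
      rw [hcnt, List.map_map]
      apply List.map_congr_left
      intro k _
      simp only [Function.comp]
      have hmax : max 0 (1 + (k : Int) - n) = ((k + 1 - N : Nat) : Int) := by omega
      have he : (1 : Int) + (k : Int) = ((k + 1 : Nat) : Int) := by omega
      rw [hmax, he, PySem.List.slice_natCast]
      simp [win]
    -- B side: shrink range
    have hshrinkB : (PySem.List.pyRange (max 0 ((L : Int) - n) + 1) (L : Int) 1).map
          (fun s => PySem.List.slice lst (some s) (some (L : Int)))
        = (List.range (L - (L - N + 1))).map (fun k => lst.drop (L - N + 1 + k)) := by
      have hstart : max 0 ((L : Int) - n) + 1 = ((L - N + 1 : Nat) : Int) := by omega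
      rw [hstart, PySem.List.pyRange_one]
      have hcnt : ((L : Int) - ((L - N + 1 : Nat) : Int)).toNat = L - (L - N + 1) := by omega
      rw [hcnt, List.map_map]
      apply List.map_congr_left
      intro k _
      simp only [Function.comp]
      have hs : ((L - N + 1 : Nat) : Int) + (k : Int) = ((L - N + 1 + k : Nat) : Int) := by omega
      rw [hs, PySem.List.slice_natCast]
      have hfull : (lst.drop (L - N + 1 + k)).length = L - (L - N + 1 + k) := by simp [hL]
      rw [← hfull, List.take_length]
    rw [hgrowA, hshrinkA, hgrowB, hshrinkB]
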